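-- pv_equiv track=rewrite | github.com/janasoumen/Python | NTPL.py | descenByAscen
-- ===== SOURCE A (Python) =====
-- def descenByAscen(l):
--     for i in range(0,len(l)-1):
--         if l[i]<l[i+1]:
--             pos=i
--             break
--     else:
--         return False
--     for j in range(pos,len(l)-1):
--         if l[j]>=l[j+1]:
--             return False
--     return True
-- ===== SOURCE B (Python) =====
-- def descenByAscen(l):
--     # Scan BACKWARDS to find the start j of the maximal strictly increasing
--     # suffix, then verify the remaining prefix l[0..j] is non-increasing.
--     n = len(l)
--     j = n - 1
--     while j > 0 and l[j - 1] < l[j]: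
--         j -= 1
--     if j > n - 2:          # no strict ascent at all (suffix shorter than 2)
--         return False
--     return all(l[k] >= l[k + 1] for k in range(j))
-- ===== Notes on version B (the rewrite author's own statement) =====
-- stated objective: alternative
-- what changed: Instead of A's forward scan for the first ascent followed by a forward re-scan of the suffix, B scans backwards from the end to locate the start of the maximal strictly increasing suffix and then checks that the remaining prefix is non-increasing.
import Mathlib
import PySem

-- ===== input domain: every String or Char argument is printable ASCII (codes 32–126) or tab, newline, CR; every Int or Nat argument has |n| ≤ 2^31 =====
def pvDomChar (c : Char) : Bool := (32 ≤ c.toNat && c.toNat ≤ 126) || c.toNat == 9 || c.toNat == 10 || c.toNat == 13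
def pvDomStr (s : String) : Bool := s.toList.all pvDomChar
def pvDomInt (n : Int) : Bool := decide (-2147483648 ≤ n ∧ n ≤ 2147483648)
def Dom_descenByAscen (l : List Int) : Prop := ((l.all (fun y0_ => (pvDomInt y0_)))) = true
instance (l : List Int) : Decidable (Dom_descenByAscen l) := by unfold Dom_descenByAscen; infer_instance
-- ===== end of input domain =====

-- B scans BACKWARDS for the start of the maximal strictly increasing suffix and then
-- checks the remaining prefix is non-increasing (alternative decomposition, same cost).
-- ===== PORT A =====
-- second loop of A: from pos on, any l[j] >= l[j+1] returns False, else True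
def pvAPhase2 : List Int → Bool
  | a :: b :: t => if a ≥ b then false else pvAPhase2 (b :: t)
  | _ => true

-- first loop of A: scan for the first i with l[i] < l[i+1]; for-else returns False if none
def pvALoop : List Int → Bool
  | a :: b :: t => if a < b then pvAPhase2 (a :: b :: t) else pvALoop (b :: t)
  | _ => false

def descenByAscen (l : List Int) : Bool := pvALoop l

-- ===== PORT B =====
-- B's backward while loop 'while j > 0 and l[j-1] < l[j]: j -= 1', j kept as a Nat
-- (all indices touched are in range, so getD equals Python's l[...] here)
def pvBWhile (l : List Int) : Nat → Nat
  | 0 => 0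
  | j + 1 => if l.getD j 0 < l.getD (j + 1) 0 then pvBWhile l j else j + 1

def descenByAscen_alt (l : List Int) : Bool :=
  -- Python starts with j = n-1 (an int, so -1 for the empty list); the empty list is
  -- written as its own branch because j is carried as a Nat: Python then has -1 > -2,
  -- returning False, exactly this branch.
  if l.isEmpty then false
  else
    let j := pvBWhile l (l.length - 1)
    -- 'j > n-2' over Python ints equals 'j + 2 > n' here (n ≥ 1, j ≥ 0)
    if j + 2 > l.length then false
    else (List.range j).all (fun k => l.getD k 0 ≥ l.getD (k + 1) 0)

-- ===== PRECONDITION & SPEC =====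
def Spec_descenByAscen (l : List Int) (out : Bool) : Prop := out = descenByAscen_alt l
instance (l : List Int) (out : Bool) : Decidable (Spec_descenByAscen l out) := by unfold Spec_descenByAscen; infer_instance

-- ===== CLAIM (what is proved, stated in full; the proofs are below) =====
def Claim_equal_descenByAscen : Prop := ∀ (l : List Int), Dom_descenByAscen l → Spec_descenByAscen l (descenByAscen l)

-- ===== LEMMAS AND PROOFS =====

-- the common characterisation: some i splits l into a non-increasing prefix and a
-- strictly increasing suffix of length ≥ 2
def pvChar (l : List Int) : Prop :=
  ∃ i, i + 1 < l.length ∧ (∀ k, k < i → ¬ l.getD k 0 < l.getD (k + 1) 0) ∧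
    (∀ k, i ≤ k → k + 1 < l.length → l.getD k 0 < l.getD (k + 1) 0)

theorem pvPhase2_iff (l : List Int) :
    pvAPhase2 l = true ↔ ∀ k, k + 1 < l.length → l.getD k 0 < l.getD (k + 1) 0 := by
  induction l with
  | nil => simp [pvAPhase2]
  | cons a t ih =>
    cases t with
    | nil => simp [pvAPhase2]
    | cons b t' =>
      simp only [pvAPhase2]
      by_cases h : a ≥ b
      · simp only [if_pos h]
        constructor
        · intro hf; exact absurd hf (by simp)
        · intro hall
          have := hall 0 (by simp)
          simp at this; omega
      · simp only [if_neg h, ih]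
        constructor
        · intro htail k hk
          cases k with
          | zero => simpa using (by omega : a < b)
          | succ k' =>
            have hk' : k' + 1 < (b :: t').length := by simp at hk ⊢; omega
            have := htail k' hk'
            simpa using this
        · intro hall k hk
          have := hall (k + 1) (by simp at hk ⊢; omega)
          simpa using this

theorem pvALoop_iff (l : List Int) : pvALoop l = true ↔ pvChar l := by
  induction l with
  | nil => simp [pvALoop, pvChar]
  | cons a t ih =>
    cases t with
    | nil =>
      simp [pvALoop, pvChar]
    | cons b t' =>
      simp only [pvALoop]
      by_cases h : a < b
      · rw [if_pos h, pvPhase2_iff]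
        constructor
        · intro hall
          exact ⟨0, by simp, by intro k hk; omega, fun k _ hk => hall k hk⟩
        · rintro ⟨i, hi, hpre, hsuf⟩ k hk
          cases i with
          | zero => exact hsuf k (Nat.zero_le _) hk
          | succ i' =>
            exact absurd (by simpa using h) (by simpa using hpre 0 (Nat.succ_pos _))
      · rw [if_neg h, ih]
        constructor
        · rintro ⟨i, hi, hpre, hsuf⟩
          refine ⟨i + 1, by simp at hi ⊢; omega, ?_, ?_⟩
          · intro k hk
            cases k with
            | zero => simpa using h
            | succ k' => simpa using hpre k' (by omega)
          · intro k hik hk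
            cases k with
            | zero => omega
            | succ k' =>
              have := hsuf k' (by omega) (by simp at hk ⊢; omega)
              simpa using this
        · rintro ⟨i, hi, hpre, hsuf⟩
          cases i with
          | zero =>
            exact absurd (by simpa using hsuf 0 (Nat.zero_le _) (by simp)) (by simpa using h)
          | succ i' =>
            refine ⟨i', by simp at hi ⊢; omega, ?_, ?_⟩
            · intro k hk
              have := hpre (k + 1) (by omega); simpa using this
            · intro k hik hk
              have := hsuf (k + 1) (by omega) (by simp at hk ⊢; omega)
              simpa using this

theorem pvBWhile_spec (l : List Int) (j : Nat) :
    pvBWhile l j ≤ j ∧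
    (∀ k, pvBWhile l j ≤ k → k < j → l.getD k 0 < l.getD (k + 1) 0) ∧
    (pvBWhile l j = 0 ∨ ¬ l.getD (pvBWhile l j - 1) 0 < l.getD (pvBWhile l j) 0) := by
  induction j with
  | zero => exact ⟨le_refl _, fun k h1 h2 => absurd (h1.trans_lt h2) (by omega), Or.inl rfl⟩
  | succ j ih =>
    simp only [pvBWhile]
    by_cases h : l.getD j 0 < l.getD (j + 1) 0
    · rw [if_pos h]
      refine ⟨ih.1.trans (by omega), ?_, ih.2.2⟩
      intro k h1 h2
      rcases Nat.lt_or_ge k j with h3 | h3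
      · exact ih.2.1 k h1 h3
      · have : k = j := by omega
        subst this; exact h
    · rw [if_neg h]
      exact ⟨le_refl _, fun k h1 h2 => by omega, Or.inr (by simpa using h)⟩

theorem pvAlt_iff (l : List Int) : descenByAscen_alt l = true ↔ pvChar l := by
  unfold descenByAscen_alt
  by_cases hnil : l.isEmpty
  · simp only [if_pos hnil]
    have hlen : l.length = 0 := by simpa [List.isEmpty_iff_length_eq_zero] using hnil
    constructor
    · intro hf; exact absurd hf (by simp)
    · rintro ⟨i, hi, _⟩; omega
  · simp only [if_neg hnil]
    have hlen : 1 ≤ l.length := by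
      cases l with
      | nil => simp at hnil
      | cons a t => simp
    have hspec := pvBWhile_spec l (l.length - 1)
    set j := pvBWhile l (l.length - 1) with hj
    obtain ⟨hle, hasc, hstop⟩ := hspec
    by_cases hbig : j + 2 > l.length
    · simp only [if_pos hbig]
      constructor
      · intro hf; exact absurd hf (by simp)
      · rintro ⟨i, hi, hpre, hsuf⟩
        have hji : j ≤ i := by
          by_contra hc
          rw [Nat.not_le] at hc
          rcases hstop with h0 | hst
          · omega
          · have hjj : j - 1 + 1 = j := by omega
            exact hst (hjj ▸ hsuf (j - 1) (by omega) (by omega))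
        omega
    · simp only [if_neg hbig]
      rw [List.all_eq_true]
      constructor
      · intro hall
        refine ⟨j, by omega, ?_, ?_⟩
        · intro k hk
          have := hall k (by simpa using hk)
          simp only [List.getD_eq_getElem?_getD, decide_eq_true_eq, ge_iff_le] at this ⊢
          omega
        · intro k hjk hk
          exact hasc k (by omega) (by omega)
      · rintro ⟨i, hi, hpre, hsuf⟩ k hk
        simp only [List.mem_range] at hk
        have hji : j ≤ i := by
          by_contra hc
          rw [Nat.not_le] at hc
          rcases hstop with h0 | hst
          · omega
          · have hjj : j - 1 + 1 = j := by omega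
            exact hst (hjj ▸ hsuf (j - 1) (by omega) (by omega))
        have := hpre k (by omega)
        simp only [List.getD_eq_getElem?_getD, decide_eq_true_eq, ge_iff_le] at this ⊢
        omega

-- ===== VERDICT (by name: the statement is the Claim_ definition above) =====
theorem descenByAscen_spec : Claim_equal_descenByAscen := by
  intro l _
  unfold Spec_descenByAscen descenByAscen
  rw [Bool.eq_iff_iff, pvALoop_iff, pvAlt_iff]
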